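-- pv_equiv track=rewrite | github.com/Gauthams1/code-snips | Kickstart Round B 2018/No Nine/index.py | nines
-- ===== SOURCE A (Python) =====
-- def nines(start,end):
-- 	count=0
-- 	count2=0
-- 	for i in range(start,end):
-- 		if str(i).find('9') < 0:
-- 			count+=1
-- 			if i%9 == 0:
-- 				count2+=1
-- 	return (str(count+1)+"  count2  "+str(count2))
-- ===== SOURCE B (Python) =====
-- def nines(start, end):
--     # Digit-count formulation: F(n) gives, for n >= 0, the number of
--     # integers in [0, n) with no digit 9, and how many of those are
--     # divisible by 9; computed in O(number of digits of n).
--     def no9(n):  # n >= 0: decimal digits of n contain no 9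
--         while n:
--             if n % 10 == 9:
--                 return False
--             n //= 10
--         return True
--
--     def F(n):  # n >= 0
--         if n == 0:
--             return (0, 0)
--         q, r = divmod(n, 10)
--         fq, _ = F(q)
--         f = 9 * fq + (r if no9(q) else 0)
--         g = fq + (1 if no9(q) and (9 - q % 9) % 9 < r else 0)
--         return (f, g)
--
--     pos = (0, 0)
--     if end > max(start, 0):
--         a1, a2 = F(end)
--         b1, b2 = F(max(start, 0))
--         pos = (a1 - b1, a2 - b2)
--     neg = (0, 0)
--     if start < min(end, 0):
--         a1, a2 = F(-start + 1)
--         b1, b2 = F(1 - min(end, 0))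
--         neg = (a1 - b1, a2 - b2)
--     return str(pos[0] + neg[0] + 1) + "  count2  " + str(pos[1] + neg[1])
-- ===== Notes on version B (the rewrite author's own statement) =====
-- stated objective: faster
-- what changed: Replaced the per-element scan of range(start,end) (string-search for '9' on every i) by a closed-form digit-count function F(n) that counts no-nine numbers and no-nine multiples of 9 below n by recursing on n//10, applied at the four interval endpoints (positive and negative parts).
import Mathlib
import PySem

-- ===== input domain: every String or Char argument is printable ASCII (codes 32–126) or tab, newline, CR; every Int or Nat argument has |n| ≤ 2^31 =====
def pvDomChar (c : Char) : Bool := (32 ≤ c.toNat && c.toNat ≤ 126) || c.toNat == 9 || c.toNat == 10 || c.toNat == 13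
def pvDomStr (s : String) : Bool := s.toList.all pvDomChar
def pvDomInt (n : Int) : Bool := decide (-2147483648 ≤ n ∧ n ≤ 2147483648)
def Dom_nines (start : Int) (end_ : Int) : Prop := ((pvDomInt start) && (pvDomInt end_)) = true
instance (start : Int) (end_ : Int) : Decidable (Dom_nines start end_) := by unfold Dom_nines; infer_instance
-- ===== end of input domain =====

-- B replaces A's per-element scan of range(start,end) by an O(digits) digit-count
-- recursion evaluated at the interval endpoints (objective: faster, asymptotic).

-- ===== PORT A =====
def nines (start : Int) (end_ : Int) : String :=
  let p := (PySem.List.pyRange start end_ 1).foldl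
    (fun (st : Int × Int) (i : Int) =>
      if PySem.Str.find (PySem.Int.toStr i) "9" < 0 then
        (st.1 + 1, if PySem.Int.mod i 9 == 0 then st.2 + 1 else st.2)
      else st) (0, 0)
  PySem.Int.toStr (p.1 + 1) ++ "  count2  " ++ PySem.Int.toStr p.2

-- ===== PORT B =====
-- Source B's no9(n): while-loop over the decimal digits of n (n ≥ 0)
def pvNo9 : Nat → Bool
  | 0 => true
  | n + 1 => if (n + 1) % 10 == 9 then false else pvNo9 ((n + 1) / 10)
  decreasing_by exact Nat.div_lt_self (Nat.succ_pos n) (by norm_num)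

-- Source B's F(n), n ≥ 0: (#no-nine in [0,n), #no-nine multiples of 9 in [0,n))
def pvF : Nat → Int × Int
  | 0 => (0, 0)
  | n + 1 =>
    let q := (n + 1) / 10
    let r := (n + 1) % 10
    let fq := (pvF q).1
    (9 * fq + (if pvNo9 q then (r : Int) else 0),
     fq + (if pvNo9 q && decide ((9 - q % 9) % 9 < r) then 1 else 0))
  decreasing_by exact Nat.div_lt_self (Nat.succ_pos n) (by norm_num)

def nines_alt (start : Int) (end_ : Int) : String :=
  let pos : Int × Int :=
    if end_ > max start 0 then
      ((pvF end_.toNat).1 - (pvF (max start 0).toNat).1,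
       (pvF end_.toNat).2 - (pvF (max start 0).toNat).2)
    else (0, 0)
  let neg : Int × Int :=
    if start < min end_ 0 then
      ((pvF (-start + 1).toNat).1 - (pvF (1 - min end_ 0).toNat).1,
       (pvF (-start + 1).toNat).2 - (pvF (1 - min end_ 0).toNat).2)
    else (0, 0)
  PySem.Int.toStr (pos.1 + neg.1 + 1) ++ "  count2  " ++ PySem.Int.toStr (pos.2 + neg.2)

-- ===== PRECONDITION & SPEC =====
def Spec_nines (start : Int) (end_ : Int) (out : String) : Prop := out = nines_alt start end_
instance (start : Int) (end_ : Int) (out : String) : Decidable (Spec_nines start end_ out) := by unfold Spec_nines; infer_instance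

-- ===== CLAIM (what is proved, stated in full; the proofs are below) =====
def Claim_equal_nines : Prop := ∀ (start : Int) (end_ : Int), Dom_nines start end_ → Spec_nines start end_ (nines start end_)

-- ===== LEMMAS AND PROOFS =====

-- i is "good" when str(i) has no digit '9' (sign ignored: digits of |i|)
def pvGood (i : Int) : Bool := pvNo9 i.natAbs
def pvGood9 (i : Int) : Bool := pvNo9 i.natAbs && decide (i.natAbs % 9 = 0)

-- the pair of counters nines_alt computes, as a function
def pvG (a b : Int) : Int × Int :=
  let pos : Int × Int :=
    if b > max a 0 then
      ((pvF b.toNat).1 - (pvF (max a 0).toNat).1,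
       (pvF b.toNat).2 - (pvF (max a 0).toNat).2)
    else (0, 0)
  let neg : Int × Int :=
    if a < min b 0 then
      ((pvF (-a + 1).toNat).1 - (pvF (1 - min b 0).toNat).1,
       (pvF (-a + 1).toNat).2 - (pvF (1 - min b 0).toNat).2)
    else (0, 0)
  (pos.1 + neg.1, pos.2 + neg.2)

lemma nines_alt_eq_pvG (a b : Int) :
    nines_alt a b = PySem.Int.toStr ((pvG a b).1 + 1) ++ "  count2  " ++ PySem.Int.toStr (pvG a b).2 := rfl

lemma pvNo9_lt_ten {n : Nat} (h : n < 10) : pvNo9 n = false ↔ n = 9 := by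
  interval_cases n <;> simp [pvNo9]

lemma digitChar_eq_nine {m : Nat} (h : m < 10) : Nat.digitChar m = '9' ↔ m = 9 := by
  interval_cases m <;> decide

lemma mem9_toDigitsCore (fuel : Nat) : ∀ (n : Nat) (ds : List Char), n < 10 ^ fuel →
    ('9' ∈ Nat.toDigitsCore 10 fuel n ds ↔ (pvNo9 n = false ∨ '9' ∈ ds)) := by
  induction fuel with
  | zero =>
    intro n ds h
    interval_cases n
    simp [Nat.toDigitsCore, pvNo9]
  | succ fuel ih =>
    intro n ds h
    rw [Nat.toDigitsCore]
    by_cases h0 : n / 10 = 0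
    · have hn : n < 10 := by omega
      have hm : n % 10 = n := Nat.mod_eq_of_lt hn
      rw [hm, if_pos h0]
      simp only [List.mem_cons]
      have hch : ('9' = n.digitChar) ↔ n = 9 :=
        ⟨fun h => (digitChar_eq_nine hn).mp h.symm, fun h => ((digitChar_eq_nine hn).mpr h).symm⟩
      rw [hch, pvNo9_lt_ten hn]
    · rw [if_neg h0]
      rw [ih (n / 10) _ (by
        have : 10 ^ fuel * 10 = 10 ^ (fuel + 1) := by ring
        omega)]
      have hn0 : n ≠ 0 := by omega
      have hdef : pvNo9 n = if n % 10 == 9 then false else pvNo9 (n / 10) := by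
        cases n with
        | zero => omega
        | succ m => rw [pvNo9]
      have h10 : n % 10 < 10 := Nat.mod_lt _ (by norm_num)
      constructor
      · rintro (hq | hmem)
        · left
          rw [hdef]; split <;> simp [hq]
        · rcases List.mem_cons.mp hmem with hd | hds
          · left
            rw [hdef, if_pos]
            simp only [beq_iff_eq]
            exact (digitChar_eq_nine h10).mp hd.symm
          · right; exact hds
      · rintro (hq | hds)
        · rw [hdef] at hq
          by_cases h9 : n % 10 = 9
          · right
            exact List.mem_cons.mpr (Or.inl ((digitChar_eq_nine h10).mpr h9).symm)
          · left
            simpa [h9] using hq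
        · right; exact List.mem_cons.mpr (Or.inr hds)

lemma mem9_toDigits (n : Nat) : '9' ∈ Nat.toDigits 10 n ↔ pvNo9 n = false := by
  have hpow : n < 10 ^ (n + 1) := by
    calc n < n + 1 := Nat.lt_succ_self n
    _ ≤ 10 ^ (n + 1) := Nat.le_of_lt (Nat.lt_pow_self (by norm_num))
  rw [Nat.toDigits, mem9_toDigitsCore (n + 1) n [] hpow]
  simp

lemma condA_good (i : Int) : (PySem.Str.find (PySem.Int.toStr i) "9" < 0) ↔ pvGood i = true := by
  have h1 : PySem.Str.find (PySem.Int.toStr i) "9" = PySem.Chars.find (PySem.Int.toStr i).toList ['9'] := by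
    rw [PySem.Str.find_eq]; rfl
  have h2 : (PySem.Str.find (PySem.Int.toStr i) "9" < 0) ↔ ¬ (['9'] <:+: (PySem.Int.toStr i).toList) := by
    rw [h1]
    constructor
    · intro h hin
      exact absurd ((PySem.Chars.find_nonneg_iff _ _).mpr hin) (by omega)
    · intro h
      rcases lt_or_ge (PySem.Chars.find (PySem.Int.toStr i).toList ['9']) 0 with hlt | hge
      · exact hlt
      · exact absurd ((PySem.Chars.find_nonneg_iff _ _).mp hge) h
  rw [h2, List.singleton_infix_iff, PySem.Int.toList_toStr, PySem.Int.toChars]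
  unfold pvGood
  by_cases hneg : i < 0
  · rw [if_pos hneg]
    simp only [List.mem_cons]
    rw [mem9_toDigits]
    constructor
    · intro h
      cases hb : pvNo9 i.natAbs
      · exact absurd (Or.inr hb) h
      · rfl
    · intro h
      rintro (hc | hc)
      · exact absurd hc.symm (by decide)
      · rw [h] at hc; cases hc
  · rw [if_neg hneg]
    have : i.toNat = i.natAbs := by omega
    rw [this, mem9_toDigits]
    cases hb : pvNo9 i.natAbs <;> simp

lemma condA_div9 (i : Int) : (PySem.Int.mod i 9 == 0) = decide (i.natAbs % 9 = 0) := by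
  have h1 : (PySem.Int.mod i 9 == 0) = decide (PySem.Int.mod i 9 = 0) := by
    cases hd : decide (PySem.Int.mod i 9 = 0) <;> simp_all
  rw [h1]
  have h2 : (PySem.Int.mod i 9 = 0) ↔ ((9 : Int) ∣ i) := PySem.Int.mod_eq_zero_iff_dvd i 9
  have h3 : ((9 : Int) ∣ i) ↔ (9 ∣ i.natAbs) := by
    rw [Int.natAbs_dvd_natAbs.symm]; rfl
  have h4 : (9 ∣ i.natAbs) ↔ i.natAbs % 9 = 0 := Nat.dvd_iff_mod_eq_zero
  simp only [h2, h3, h4]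

-- A's loop computes the two counts of pvGood / pvGood9 elements
lemma foldA (l : List Int) : ∀ (c c2 : Int),
    l.foldl (fun (st : Int × Int) (i : Int) =>
      if PySem.Str.find (PySem.Int.toStr i) "9" < 0 then
        (st.1 + 1, if PySem.Int.mod i 9 == 0 then st.2 + 1 else st.2)
      else st) (c, c2)
    = (c + (l.countP pvGood : Int), c2 + (l.countP pvGood9 : Int)) := by
  induction l with
  | nil => intro c c2; simp
  | cons i l ih =>
    intro c c2
    simp only [List.foldl_cons, List.countP_cons]
    by_cases hg : pvGood i = true
    · rw [if_pos ((condA_good i).mpr hg)]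
      by_cases h9 : i.natAbs % 9 = 0
      · have : (PySem.Int.mod i 9 == 0) = true := by rw [condA_div9]; simp [h9]
        rw [if_pos this, ih]
        have hg9 : pvGood9 i = true := by unfold pvGood9; unfold pvGood at hg; simp [hg, h9]
        simp [hg, hg9]
        constructor <;> ring
      · have : (PySem.Int.mod i 9 == 0) = false := by rw [condA_div9]; simp [h9]
        rw [this]
        simp only [Bool.false_eq_true, if_false]
        rw [ih]
        have hg9 : pvGood9 i = false := by unfold pvGood9; simp [h9]
        simp [hg, hg9]
        ring
    · rw [if_neg (fun h => hg ((condA_good i).mp h)), ih]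
      have hg9 : pvGood9 i = false := by
        unfold pvGood9; unfold pvGood at hg
        simp [Bool.not_eq_true] at hg
        simp [hg]
      simp [hg, hg9]

-- the key recurrence of Source B's F: stepping the upper bound by one
lemma pvF_succ (n : Nat) : pvF (n + 1) =
    ((pvF n).1 + (if pvNo9 n then 1 else 0),
     (pvF n).2 + (if pvNo9 n && decide (n % 9 = 0) then 1 else 0)) := by
  induction n using Nat.strong_induction_on with
  | _ n ih =>
    match n with
    | 0 => norm_num [pvF, pvNo9]
    | m + 1 =>
      set Q := (m + 1) / 10 with hQ
      set R := (m + 1) % 10 with hR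
      have hQR : m + 1 = 10 * Q + R ∧ R < 10 :=
        ⟨(Nat.div_add_mod _ _).symm ▸ by omega, Nat.mod_lt _ (by norm_num)⟩
      have hno9 : pvNo9 (m + 1) = if R == 9 then false else pvNo9 Q := by rw [pvNo9]
      by_cases h9 : R = 9
      · -- carry case: m+2 = 10*(Q+1)
        have hq' : (m + 2) / 10 = Q + 1 := by omega
        have hr' : (m + 2) % 10 = 0 := by omega
        have hIH := ih Q (by omega)
        have hb0 : (9 - Q % 9) % 9 < 9 := by omega
        rw [pvF, pvF]
        simp only [← hQ, ← hR, hq', hr', hIH, hno9, h9]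
        simp only [beq_self_eq_true, if_true, Bool.false_and, Bool.and_eq_true, decide_eq_true_eq]
        norm_num
        constructor
        · split <;> ring
        · split
          next hq => rw [if_pos ⟨hq, hb0⟩]
          next hq => rw [if_neg fun h => hq h.1]
      · -- no carry: m+2 = 10*Q + (R+1)
        have hq' : (m + 2) / 10 = Q := by omega
        have hr' : (m + 2) % 10 = R + 1 := by omega
        rw [pvF, pvF]
        simp only [← hQ, ← hR, hq', hr', hno9]
        have hR9 : (R == 9) = false := by simp [h9]
        simp only [hR9, Bool.false_eq_true, if_false, Prod.mk.injEq]
        have hdvd : (9 - Q % 9) % 9 = R ↔ (m + 1) % 9 = 0 := by omega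
        constructor
        · split
          · push_cast; ring
          · ring
        · by_cases hq : pvNo9 Q = true
          · simp only [hq, Bool.true_and, decide_eq_true_eq]
            by_cases hd : (9 - Q % 9) % 9 < R
            · have hne : (9 - Q % 9) % 9 ≠ R := by omega
              rw [if_pos (show (9 - Q % 9) % 9 < R + 1 by omega), if_pos hd,
                  if_neg (fun h => hne (hdvd.mpr h))]
              ring
            · by_cases he : (9 - Q % 9) % 9 = R
              · rw [if_pos (show (9 - Q % 9) % 9 < R + 1 by omega),
                    if_neg (show ¬ (9 - Q % 9) % 9 < R by omega), if_pos (hdvd.mp he)]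
                ring
              · rw [if_neg (show ¬ (9 - Q % 9) % 9 < R + 1 by omega),
                    if_neg (show ¬ (9 - Q % 9) % 9 < R by omega),
                    if_neg (fun h => he (hdvd.mpr h))]
                ring
          · simp only [Bool.not_eq_true] at hq
            simp [hq]

-- nines_alt's endpoint formula equals the range count
lemma pvG_eq : ∀ (k : Nat) (a b : Int), (b - a).toNat = k →
    pvG a b = (((PySem.List.pyRange a b 1).countP pvGood : Int),
               ((PySem.List.pyRange a b 1).countP pvGood9 : Int)) := by
  intro k
  induction k with
  | zero =>
    intro a b hk
    have hba : b ≤ a := by omega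
    rw [PySem.List.pyRange_one_eq_nil hba]
    have hmax : max a 0 ≥ a := le_max_left a 0
    have hmin : min b 0 ≤ b := min_le_left b 0
    unfold pvG
    rw [if_neg (by omega), if_neg (by omega)]
    simp
  | succ k ih =>
    intro a b hk
    have hab : a < b := by omega
    have hsplit : PySem.List.pyRange a b 1 = PySem.List.pyRange a (b - 1) 1 ++ [b - 1] := by
      have h := PySem.List.pyRange_one_succ_right (show a ≤ b - 1 by omega)
      rw [show b - 1 + 1 = b by ring] at h
      exact h
    have hih := ih a (b - 1) (by omega)
    rw [hsplit]
    -- step lemma for the endpoint formula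
    have hmain : pvG a b = ((pvG a (b-1)).1 + (if pvGood (b-1) then 1 else 0),
                            (pvG a (b-1)).2 + (if pvGood9 (b-1) then 1 else 0)) := by
      unfold pvG
      by_cases hbpos : 1 ≤ b
      · -- the element b-1 is ≥ 0: the positive side steps, the negative side is unchanged
        have hmax0 : max a 0 ≥ 0 := le_max_right a 0
        have hmaxa : max a 0 ≥ a := le_max_left a 0
        have hmin : min b 0 = 0 := by omega
        have hmin' : min (b-1) 0 = 0 := by omega
        have habs : (b - 1).natAbs = (b - 1).toNat := by omega
        have htn : b.toNat = (b - 1).toNat + 1 := by omega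
        have hgood : pvGood (b-1) = pvNo9 (b-1).toNat := by unfold pvGood; rw [habs]
        have hgood9 : pvGood9 (b-1) = (pvNo9 (b-1).toNat && decide ((b-1).toNat % 9 = 0)) := by
          unfold pvGood9; rw [habs]
        rw [hmin, hmin', htn, pvF_succ, hgood, hgood9]
        by_cases hcut : b - 1 > max a 0
        · rw [if_pos (by omega), if_pos hcut]
          by_cases ha : a < 0
          · simp only [if_pos ha, Prod.mk.injEq]
            constructor <;> ring
          · simp only [if_neg ha, Prod.mk.injEq]
            constructor <;> ring
        · have hmax : max a 0 = b - 1 := by omega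
          rw [if_pos (by omega), if_neg hcut, hmax]
          by_cases ha : a < 0
          · simp only [if_pos ha, Prod.mk.injEq]
            constructor <;> ring
          · simp only [if_neg ha, Prod.mk.injEq]
            constructor <;> ring
      · -- the element b-1 is < 0: the negative side steps, the positive side is empty
        have hmax0 : max a 0 ≥ 0 := le_max_right a 0
        have hminb : min b 0 = b := by omega
        have hminb' : min (b-1) 0 = b - 1 := by omega
        have habs : (b - 1).natAbs = (1 - b).toNat := by omega
        have hgood : pvGood (b-1) = pvNo9 (1 - b).toNat := by unfold pvGood; rw [habs]
        have hgood9 : pvGood9 (b-1) = (pvNo9 (1 - b).toNat && decide ((1 - b).toNat % 9 = 0)) := by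
          unfold pvGood9; rw [habs]
        rw [hminb, hminb', hgood, hgood9]
        simp only [if_neg (show ¬ (b > max a 0) by omega),
                   if_neg (show ¬ (b - 1 > max a 0) by omega), if_pos hab]
        by_cases hcut : a < b - 1
        · have htn : (1 - (b - 1)).toNat = (1 - b).toNat + 1 := by omega
          simp only [if_pos hcut]
          rw [htn, pvF_succ]
          simp only [Prod.mk.injEq]
          constructor <;> ring
        · have hae : a = b - 1 := by omega
          have h2 : (-a + 1).toNat = (1 - b).toNat + 1 := by omega
          simp only [if_neg hcut]
          rw [h2, pvF_succ]
          simp only [Prod.mk.injEq]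
          constructor <;> ring
    rw [hmain, hih]
    simp only [List.countP_append, List.countP_cons, List.countP_nil, Prod.mk.injEq]
    constructor <;> · push_cast; ring

-- ===== VERDICT (by name: the statement is the Claim_ definition above) =====
theorem nines_spec : Claim_equal_nines := by
  unfold Claim_equal_nines
  intro a b _
  unfold Spec_nines
  rw [nines_alt_eq_pvG, pvG_eq (b - a).toNat a b rfl]
  unfold nines
  rw [foldA]
  norm_num
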